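-- pv_equiv track=rewrite | github.com/GeTo0/FIITSTU | 2. rocnik/zimny semester/PKS/Cvicenie 1 - uloha 1/main (1).py | format_hex_string
-- ===== SOURCE A (Python) =====
-- def format_hex_string(hex_data):
--     hexDataFinal = ""
--     counter2=1
--     for pismeno in hex_data:
--         hexDataFinal += pismeno
--         if counter2 % 2 == 0 and counter2 % 32 != 0:
--             hexDataFinal += ' '
--         elif counter2 % 32 == 0:
--             hexDataFinal += '\n'
--         counter2 += 1
--     return hexDataFinal
-- ===== SOURCE B (Python) =====
-- def format_hex_string(hex_data):
--     parts = []
--     idx = 1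
--     rest = hex_data
--     while len(rest) >= 2:
--         parts.append(rest[:2])
--         parts.append('\n' if idx % 16 == 0 else ' ')
--         idx += 1
--         rest = rest[2:]
--     parts.append(rest)
--     return ''.join(parts)
-- ===== Notes on version B (the rewrite author's own statement) =====
-- stated objective: simpler
-- what changed: B consumes the string two characters at a time with a while-loop over the remaining suffix, collecting each pair plus its separator in a list joined once at the end, instead of A's per-character loop with a counter and ad-hoc parity/mod-32 tests and repeated string concatenation.
import Mathlib
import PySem

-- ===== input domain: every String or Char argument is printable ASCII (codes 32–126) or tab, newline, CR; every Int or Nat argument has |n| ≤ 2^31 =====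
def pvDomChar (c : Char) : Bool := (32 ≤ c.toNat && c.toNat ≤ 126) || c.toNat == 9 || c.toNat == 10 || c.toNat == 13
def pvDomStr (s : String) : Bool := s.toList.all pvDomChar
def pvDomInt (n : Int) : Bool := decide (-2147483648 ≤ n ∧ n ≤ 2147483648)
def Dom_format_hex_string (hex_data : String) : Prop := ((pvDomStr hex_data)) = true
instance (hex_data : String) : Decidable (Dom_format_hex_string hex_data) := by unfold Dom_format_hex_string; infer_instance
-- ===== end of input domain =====

-- B consumes the string two characters at a time (a while-loop over the remaining suffix,
-- joining collected parts at the end) instead of A's per-character loop with a counter and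
-- repeated string concatenation; objective: simpler.

-- ===== PORT A =====
-- one iteration of A's for-loop: append the char, then the separator chosen by counter2
def stepA (st : String × Nat) (pismeno : Char) : String × Nat :=
  let s := st.1.push pismeno
  let s := if st.2 % 2 == 0 && st.2 % 32 != 0 then s.push ' '
           else if st.2 % 32 == 0 then s.push '\n' else s
  (s, st.2 + 1)

def format_hex_string (hex_data : String) : String :=
  (hex_data.toList.foldl stepA ("", 1)).1

-- ===== PORT B =====
-- the while-loop of Source B: rest is the remaining characters, idx the 1-based pair index;
-- the final append of the (short) remainder is the second equation
def altGo : List Char → Nat → List String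
  | c1 :: c2 :: rest, idx =>
      String.ofList [c1, c2] :: (if idx % 16 == 0 then "\n" else " ") :: altGo rest (idx + 1)
  | rest, _ => [String.ofList rest]

def format_hex_string_alt (hex_data : String) : String :=
  String.join (altGo hex_data.toList 1)

-- ===== PRECONDITION & SPEC =====
def Spec_format_hex_string (hex_data : String) (out : String) : Prop := out = format_hex_string_alt hex_data
instance (hex_data : String) (out : String) : Decidable (Spec_format_hex_string hex_data out) := by unfold Spec_format_hex_string; infer_instance

-- ===== CLAIM (what is proved, stated in full; the proofs are below) =====
def Claim_equal_format_hex_string : Prop := ∀ (hex_data : String), Dom_format_hex_string hex_data → Spec_format_hex_string hex_data (format_hex_string hex_data)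

-- ===== LEMMAS AND PROOFS =====

lemma ofList_pair (c1 c2 : Char) :
    String.ofList [c1] ++ String.ofList [c2] = String.ofList [c1, c2] := by
  apply String.toList_inj.mp; simp

lemma push_ofList (acc : String) (c : Char) : acc.push c = acc ++ String.ofList [c] := by
  apply String.toList_inj.mp; simp

lemma foldl_append_join (l : List String) (a : String) :
    l.foldl (· ++ ·) a = a ++ String.join l := by
  induction l generalizing a with
  | nil => simp [String.join]
  | cons s l ih => simp [String.join] at ih ⊢; rw [ih, ih s, String.append_assoc]

lemma join_cons (s : String) (l : List String) :
    String.join (s :: l) = s ++ String.join l := by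
  show (s :: l).foldl (· ++ ·) "" = _
  rw [List.foldl_cons, foldl_append_join]; simp

lemma keyA : ∀ (l : List Char) (i : Nat) (acc : String),
    (l.foldl stepA (acc, 2 * i + 1)).1 = acc ++ String.join (altGo l (i + 1))
  | [], i, acc => by simp [altGo, String.join]
  | [c], i, acc => by
      have hc : ((2 * i + 1) % 2 == 0 && (2 * i + 1) % 32 != 0) = false := by
        simp <;> omega
      have h2 : ((2 * i + 1) % 32 == 0) = false := by simp <;> omega
      simp only [List.foldl_cons, List.foldl_nil, stepA, hc, h2, Bool.false_eq_true,
        if_false, altGo]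
      rw [join_cons]
      simp [String.join, push_ofList]
  | c1 :: c2 :: rest, i, acc => by
      have hp2 : ((2 * i + 1) % 2 == 0) = false := by simp <;> omega
      have h2 : ((2 * i + 1) % 32 == 0) = false := by simp <;> omega
      have he : ((2 * i + 1 + 1) % 2 == 0) = true := by simp <;> omega
      have hmod : ((2 * i + 1 + 1) % 32 == 0) = ((i + 1) % 16 == 0) := by
        by_cases h : (i + 1) % 16 = 0 <;> simp [h] <;> omega
      have harith : 2 * i + 1 + 1 + 1 = 2 * (i + 1) + 1 := by ring
      have ih := keyA rest (i + 1)
      simp only [List.foldl_cons, stepA, bne, hp2, h2, he, hmod, Bool.not_false,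
        Bool.not_true, Bool.and_true, Bool.and_false, Bool.false_and, Bool.true_and,
        Bool.false_eq_true, if_false, if_true, harith]
      by_cases h16 : ((i + 1) % 16 == 0) = true
      · simp only [h16, Bool.false_eq_true, if_false, if_true, ih, altGo]
        rw [join_cons, join_cons]
        simp only [push_ofList, ofList_pair, String.append_assoc]
        simp [String.append_assoc]
      · simp only [eq_false_of_ne_true h16, Bool.false_eq_true, if_false, ih, altGo]
        rw [join_cons, join_cons]
        simp only [push_ofList, ofList_pair, String.append_assoc]
        simp [String.append_assoc]

lemma main_eq (hex_data : String) :
    format_hex_string hex_data = format_hex_string_alt hex_data := by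
  have := keyA hex_data.toList 0 ""
  simpa [format_hex_string, format_hex_string_alt] using this

-- ===== VERDICT (by name: the statement is the Claim_ definition above) =====
theorem format_hex_string_spec : Claim_equal_format_hex_string := by
  intro s _
  exact main_eq s
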